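-- pv_equiv track=rewrite | github.com/nanaijoel/3D_Model_from_Cam | fusion.py | _choose_bucketed_best
-- ===== SOURCE A (Python) =====
-- def _choose_bucketed_best(candidates, scores, total_N, num_refs):
--     chosen = []
--     if not candidates: return chosen
--     candidates = sorted(set(int(c) for c in candidates))
--     num_refs  = max(1, int(num_refs))
--     bucket_w  = total_N / float(num_refs)
--     for b in range(num_refs):
--         a = int(round(b*bucket_w)); z = int(round((b+1)*bucket_w))
--         bucket = [c for c in candidates if a <= c < z]
--         if bucket:
--             best = max(bucket, key=lambda i: int(scores[i]))
--             chosen.append(best)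
--         else:
--             center = int(round((a+z)/2.0))
--             best = min(candidates, key=lambda i: abs(i-center))
--             if best not in chosen: chosen.append(best)
--     return sorted(set(chosen))
-- ===== SOURCE B (Python) =====
-- # B: sort/dedup once, then per bucket locate its candidate segment with bisect
-- # (O((N + num_refs) log N) instead of A's O(num_refs * N) rescans); same values.
-- from bisect import bisect_left
--
-- def _choose_bucketed_best(candidates, scores, total_N, num_refs):
--     if not candidates:
--         return []
--     cs = sorted(set(int(c) for c in candidates))
--     num_refs = max(1, int(num_refs))
--     bucket_w = total_N / float(num_refs)
--     bounds = [int(round(b * bucket_w)) for b in range(num_refs + 1)]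
--     chosen = set()
--     for b in range(num_refs):
--         a, z = bounds[b], bounds[b + 1]
--         lo, hi = bisect_left(cs, a), bisect_left(cs, z)
--         if lo < hi:
--             chosen.add(max(cs[lo:hi], key=lambda i: int(scores[i])))
--         else:
--             center = int(round((a + z) / 2.0))
--             p = bisect_left(cs, center)
--             if p == 0:
--                 chosen.add(cs[0])
--             elif p == len(cs):
--                 chosen.add(cs[-1])
--             else:
--                 l, r = cs[p - 1], cs[p]
--                 chosen.add(l if center - l <= r - center else r)
--     return sorted(chosen)
-- ===== Notes on version B (the rewrite author's own statement) =====
-- stated objective: faster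
-- what changed: B sorts/dedups the candidates once and then finds each bucket's segment (and the fallback's nearest candidate) with bisect_left on the sorted list, instead of A's full rescan of all candidates for every bucket.
-- outside the precondition, e.g. on _choose_bucketed_best([2], {5: 1}, 10, 1): A raises KeyError, B raises KeyError
import Mathlib
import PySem

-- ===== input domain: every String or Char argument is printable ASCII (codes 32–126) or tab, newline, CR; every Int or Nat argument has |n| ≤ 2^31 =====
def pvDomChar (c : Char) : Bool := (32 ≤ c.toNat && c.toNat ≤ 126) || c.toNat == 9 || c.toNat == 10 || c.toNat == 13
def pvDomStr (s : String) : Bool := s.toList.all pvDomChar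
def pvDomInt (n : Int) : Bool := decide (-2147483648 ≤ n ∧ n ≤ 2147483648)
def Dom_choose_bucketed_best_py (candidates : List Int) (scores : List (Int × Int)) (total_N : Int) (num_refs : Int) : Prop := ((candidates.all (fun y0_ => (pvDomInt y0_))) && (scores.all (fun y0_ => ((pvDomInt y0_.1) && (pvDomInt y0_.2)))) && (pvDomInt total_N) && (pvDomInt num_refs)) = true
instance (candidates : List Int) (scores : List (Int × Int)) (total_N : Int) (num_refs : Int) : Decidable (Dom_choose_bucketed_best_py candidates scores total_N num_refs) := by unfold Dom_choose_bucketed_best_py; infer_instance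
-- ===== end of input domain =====

-- B replaces A's per-bucket rescans of the whole candidate list by one sort plus
-- bisect lookups per bucket (objective: faster); return values are identical.

-- ===== PORT A =====
-- Shared float helpers (both Python versions compute the identical expressions
-- `int(round(b * (total_N / float(num_refs))))` and `int(round((a+z)/2.0))`).
-- pvRNE x = Python round(x): round half to even, exact on rationals.
def pvRNE (x : ℚ) : Int :=
  let n : Int := ⌊x⌋
  let f : ℚ := x - (n : ℚ)
  if f < 1/2 then n
  else if 1/2 < f then n + 1
  else if n % 2 = 0 then n else n + 1

-- pvFl53 x = the IEEE binary64 value nearest x (round to nearest, ties to even);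
-- exact for the magnitudes reachable here (no overflow/subnormals inside Dom).
def pvFl53 (x : ℚ) : ℚ :=
  if x = 0 then 0
  else
    let e : Int := Int.log 2 |x|
    (pvRNE (x / 2 ^ (e - 52)) : ℚ) * 2 ^ (e - 52)

-- pvBound T nr b = int(round(b * bucket_w)) with bucket_w = T / float(nr):
-- T and nr are exact as doubles inside Dom; the division and the product round once each.
def pvBound (T nr b : Int) : Int :=
  pvRNE (pvFl53 ((b : ℚ) * pvFl53 ((T : ℚ) / (nr : ℚ))))

-- pvCenter a z = int(round((a+z)/2.0)) — (a+z)/2.0 is exact in binary64 at these magnitudes.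
def pvCenter (a z : Int) : Int := pvRNE (((a + z : Int) : ℚ) / 2)

-- loop body of A: one bucket b; `int(scores[i])` is `getD … 0` (KeyError is excluded by Pre_).
def pvStepA (scores : List (Int × Int)) (T nr : Int) (cs : List Int) (chosen : List Int) (b : Int) : List Int :=
  let a := pvBound T nr b
  let z := pvBound T nr (b + 1)
  let bucket := cs.filter (fun c => decide (a ≤ c ∧ c < z))
  if bucket ≠ [] then
    match PySem.List.max? bucket (fun i => PySem.Dict.getD ⟨scores⟩ i 0) with
    | some best => chosen ++ [best]
    | none => chosen
  else
    let center := pvCenter a z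
    match PySem.List.min? cs (fun i => |i - center|) with
    | some best => if best ∈ chosen then chosen else chosen ++ [best]
    | none => chosen

def choose_bucketed_best_py (candidates : List Int) (scores : List (Int × Int)) (total_N : Int) (num_refs : Int) : List Int :=
  if candidates = [] then []
  else
    let cs := PySem.List.sorted (PySem.Set.ofList candidates) (fun x => x)
    let nr : Int := max 1 num_refs
    let chosen := (PySem.List.pyRange 0 nr 1).foldl (pvStepA scores total_N nr cs) []
    PySem.List.sorted (PySem.Set.ofList chosen) (fun x => x)

-- ===== PORT B =====
-- loop body of B: bucket segment located with bisect_left; fallback compares the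
-- two bisect neighbours of the bucket centre.
def pvStepB (scores : List (Int × Int)) (bounds : List Int) (cs : List Int) (chosen : PySem.Set Int) (b : Int) : PySem.Set Int :=
  let a := PySem.List.pyGetD bounds b 0
  let z := PySem.List.pyGetD bounds (b + 1) 0
  let lo := PySem.List.bisectLeft cs a
  let hi := PySem.List.bisectLeft cs z
  if lo < hi then
    match PySem.List.max? (PySem.List.slice cs (some (lo : Int)) (some (hi : Int))) (fun i => PySem.Dict.getD ⟨scores⟩ i 0) with
    | some best => chosen.add best
    | none => chosen
  else
    let center := pvCenter a z
    let p := PySem.List.bisectLeft cs center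
    if p = 0 then chosen.add (PySem.List.pyGetD cs 0 0)
    else if p = cs.length then chosen.add (PySem.List.pyGetD cs (-1) 0)
    else
      let l := PySem.List.pyGetD cs ((p : Int) - 1) 0
      let r := PySem.List.pyGetD cs (p : Int) 0
      chosen.add (if center - l ≤ r - center then l else r)

def choose_bucketed_best_py_alt (candidates : List Int) (scores : List (Int × Int)) (total_N : Int) (num_refs : Int) : List Int :=
  if candidates = [] then []
  else
    let cs := PySem.List.sorted (PySem.Set.ofList candidates) (fun x => x)
    let nr : Int := max 1 num_refs
    let bounds : List Int := (PySem.List.pyRange 0 (nr + 1) 1).map (fun b => pvBound total_N nr b)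
    let chosen := (PySem.List.pyRange 0 nr 1).foldl (pvStepB scores bounds cs) PySem.Set.empty
    PySem.List.sorted chosen (fun x => x)

-- ===== PRECONDITION & SPEC =====
-- Pre_ excludes exactly the inputs on which A raises KeyError: a candidate that
-- falls into some bucket (equivalently, lies in [0, total_N)) but is not a key of scores.
def Pre_choose_bucketed_best_py (candidates : List Int) (scores : List (Int × Int)) (total_N : Int) (num_refs : Int) : Prop :=
  ∀ c ∈ candidates, (0 ≤ c ∧ c < total_N) → c ∈ scores.map Prod.fst
instance (candidates : List Int) (scores : List (Int × Int)) (total_N : Int) (num_refs : Int) : Decidable (Pre_choose_bucketed_best_py candidates scores total_N num_refs) := by unfold Pre_choose_bucketed_best_py; infer_instance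

def pvWitness_choose_bucketed_best_py : List Int × (List (Int × Int)) × Int × Int := ([3, 0, 1], [(0, 5), (1, 7), (3, 2)], 4, 2)

def Spec_choose_bucketed_best_py (candidates : List Int) (scores : List (Int × Int)) (total_N : Int) (num_refs : Int) (out : List Int) : Prop := out = choose_bucketed_best_py_alt candidates scores total_N num_refs
instance (candidates : List Int) (scores : List (Int × Int)) (total_N : Int) (num_refs : Int) (out : List Int) : Decidable (Spec_choose_bucketed_best_py candidates scores total_N num_refs out) := by unfold Spec_choose_bucketed_best_py; infer_instance

-- ===== CLAIM (what is proved, stated in full; the proofs are below) =====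
def Claim_equal_choose_bucketed_best_py : Prop := ∀ (candidates : List Int) (scores : List (Int × Int)) (total_N : Int) (num_refs : Int), Dom_choose_bucketed_best_py candidates scores total_N num_refs → Pre_choose_bucketed_best_py candidates scores total_N num_refs → Spec_choose_bucketed_best_py candidates scores total_N num_refs (choose_bucketed_best_py candidates scores total_N num_refs)

-- ===== LEMMAS AND PROOFS =====

theorem pv_witness_ok : Dom_choose_bucketed_best_py (pvWitness_choose_bucketed_best_py.1) (pvWitness_choose_bucketed_best_py.2.1) (pvWitness_choose_bucketed_best_py.2.2.1) (pvWitness_choose_bucketed_best_py.2.2.2) ∧ Pre_choose_bucketed_best_py (pvWitness_choose_bucketed_best_py.1) (pvWitness_choose_bucketed_best_py.2.1) (pvWitness_choose_bucketed_best_py.2.2.1) (pvWitness_choose_bucketed_best_py.2.2.2) := by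
  constructor <;> decide

-- ----- the first-minimum characterisation of PySem.List.min? -----


theorem pv_min?_keep {α κ : Type} [LinearOrder κ] (key : α → κ) :
    ∀ (suf : List α) (m : α), (∀ y ∈ suf, key m ≤ key y) →
      suf.foldl (fun acc x => match acc with
        | none => some x
        | some m => if key x < key m then some x else some m) (some m) = some m := by
  intro suf
  induction suf with
  | nil => intro m _; rfl
  | cons y suf ih =>
    intro m h
    simp only [List.foldl_cons]
    have hy : ¬ key y < key m := not_lt.mpr (h y (by simp))
    simp only [hy]
    exact ih m (fun z hz => h z (by simp [hz]))

theorem pv_min?_foldl_acc {α κ : Type} [LinearOrder κ] (key : α → κ)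
    (m : α) (suf : List α) (hsuf : ∀ y ∈ suf, key m ≤ key y) :
    ∀ (pre : List α) (acc : Option α),
      (acc = none ∨ ∃ q, acc = some q ∧ key m < key q) →
      (∀ y ∈ pre, key m < key y) →
      (pre ++ m :: suf).foldl (fun acc x => match acc with
        | none => some x
        | some m => if key x < key m then some x else some m) acc = some m := by
  intro pre
  induction pre with
  | nil =>
    intro acc hacc _
    simp only [List.nil_append, List.foldl_cons]
    rcases hacc with h|⟨q, rfl, hq⟩
    · subst h; exact pv_min?_keep key suf m hsuf
    · simp only [if_pos hq]
      exact pv_min?_keep key suf m hsuf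
  | cons x pre ih =>
    intro acc hacc hpre
    simp only [List.cons_append, List.foldl_cons]
    have hx : key m < key x := hpre x (by simp)
    have hpre' : ∀ y ∈ pre, key m < key y := fun y hy => hpre y (by simp [hy])
    rcases hacc with h|⟨q, rfl, hq⟩
    · subst h
      exact ih (some x) (Or.inr ⟨x, rfl, hx⟩) hpre'
    · by_cases h : key x < key q
      · simpa [h] using ih (some x) (Or.inr ⟨x, rfl, hx⟩) hpre'
      · simpa [h] using ih (some q) (Or.inr ⟨q, rfl, hq⟩) hpre'

-- min? returns the FIRST minimal element (Python's min with a key).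
theorem pv_min?_first {α κ : Type} [LinearOrder κ] (key : α → κ)
    (pre suf : List α) (m : α)
    (hpre : ∀ y ∈ pre, key m < key y) (hsuf : ∀ y ∈ suf, key m ≤ key y) :
    PySem.List.min? (pre ++ m :: suf) key = some m := by
  unfold PySem.List.min?
  exact pv_min?_foldl_acc key m suf hsuf pre none (Or.inl rfl) hpre

-- ----- bucket lemma: interval filter on a sorted list = bisect slice -----

theorem pv_bucket_eq (cs : List Int) (hs : cs.Pairwise (· ≤ ·)) (a z : Int) :
    cs.filter (fun c => decide (a ≤ c ∧ c < z)) =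
      (cs.drop (PySem.List.bisectLeft cs a)).take (PySem.List.bisectLeft cs z - PySem.List.bisectLeft cs a) := by
  obtain ⟨hlo_le, hlo_lt, hlo_ge⟩ := PySem.List.bisectLeft_spec cs a hs
  obtain ⟨hhi_le, hhi_lt, hhi_ge⟩ := PySem.List.bisectLeft_spec cs z hs
  set lo := PySem.List.bisectLeft cs a with hlo
  set hi := PySem.List.bisectLeft cs z with hhi
  -- split cs at lo
  conv_lhs => rw [← List.take_append_drop lo cs]
  rw [List.filter_append]
  have h1 : (cs.take lo).filter (fun c => decide (a ≤ c ∧ c < z)) = [] := by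
    rw [List.filter_eq_nil_iff]
    intro y hy
    obtain ⟨j, hj, rfl⟩ := List.mem_iff_getElem.mp hy
    have hj' : j < lo := lt_of_lt_of_le hj (by simp)
    have hjlen : j < cs.length := lt_of_lt_of_le hj (by simp [List.length_take])
    have := hlo_lt j hjlen hj'
    simp only [List.getElem_take]
    simp only [decide_eq_true_eq, not_and]
    intro hle
    omega
  rw [h1, List.nil_append]
  -- now the drop part
  by_cases hcase : hi ≤ lo
  · have hz0 : hi - lo = 0 := by omega
    rw [hz0, List.take_zero]
    rw [List.filter_eq_nil_iff]
    intro y hy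
    obtain ⟨j, hj, rfl⟩ := List.mem_iff_getElem.mp hy
    have hjlen : lo + j < cs.length := by
      simp [List.length_drop] at hj; omega
    have hge : z ≤ cs[lo + j] := hhi_ge (lo + j) hjlen (by omega)
    simp only [List.getElem_drop]
    simp only [decide_eq_true_eq, not_and]
    intro _
    omega
  · rw [Nat.not_le] at hcase
    have hdd : (cs.drop lo).drop (hi - lo) = cs.drop hi := by
      rw [List.drop_drop]; congr 1; omega
    have hsplit : cs.drop lo = (cs.drop lo).take (hi - lo) ++ cs.drop hi := by
      conv_lhs => rw [← List.take_append_drop (hi - lo) (cs.drop lo)]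
      rw [hdd]
    conv_lhs => rw [hsplit]
    rw [List.filter_append]
    have h2 : ((cs.drop lo).take (hi - lo)).filter (fun c => decide (a ≤ c ∧ c < z)) = (cs.drop lo).take (hi - lo) := by
      rw [List.filter_eq_self]
      intro y hy
      obtain ⟨j, hj, rfl⟩ := List.mem_iff_getElem.mp hy
      have hjlen : j < (cs.drop lo).length := lt_of_lt_of_le hj (by simp [List.length_take])
      have hjlen' : lo + j < cs.length := by simp [List.length_drop] at hjlen; omega
      have hjhi : j < hi - lo := lt_of_lt_of_le hj (by simp)
      have hlt : cs[lo + j] < z := hhi_lt (lo + j) hjlen' (by omega)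
      have hge : a ≤ cs[lo + j] := hlo_ge (lo + j) hjlen' (by omega)
      simp only [List.getElem_take, List.getElem_drop]
      simp only [decide_eq_true_eq]
      exact ⟨hge, hlt⟩
    have h3 : (cs.drop hi).filter (fun c => decide (a ≤ c ∧ c < z)) = [] := by
      rw [List.filter_eq_nil_iff]
      intro y hy
      obtain ⟨j, hj, rfl⟩ := List.mem_iff_getElem.mp hy
      have hjlen : hi + j < cs.length := by simp [List.length_drop] at hj; omega
      have hge : z ≤ cs[hi + j] := hhi_ge (hi + j) hjlen (by omega)
      simp only [List.getElem_drop]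
      simp only [decide_eq_true_eq, not_and]
      intro _; omega
    rw [h2, h3, List.append_nil]

theorem pv_bucket_ne_nil (cs : List Int) (hs : cs.Pairwise (· ≤ ·)) (a z : Int) :
    (cs.filter (fun c => decide (a ≤ c ∧ c < z)) ≠ []) ↔
      PySem.List.bisectLeft cs a < PySem.List.bisectLeft cs z := by
  obtain ⟨hlo_le, hlo_lt, hlo_ge⟩ := PySem.List.bisectLeft_spec cs a hs
  obtain ⟨hhi_le, hhi_lt, hhi_ge⟩ := PySem.List.bisectLeft_spec cs z hs
  rw [pv_bucket_eq cs hs a z]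
  rw [← List.length_pos_iff_ne_nil]  -- maybe name differs
  simp only [List.length_take, List.length_drop]
  omega

-- ----- fallback lemma: first-nearest on a strictly sorted list = neighbours of bisect -----

theorem pv_fallback (cs : List Int) (t : Int) (hne : cs ≠ []) (hs : cs.Pairwise (· < ·)) :
    PySem.List.min? cs (fun i => |i - t|) = some (
      let p := PySem.List.bisectLeft cs t
      if p = 0 then PySem.List.pyGetD cs 0 0
      else if p = cs.length then PySem.List.pyGetD cs (-1) 0
      else if t - PySem.List.pyGetD cs ((p : Int) - 1) 0 ≤ PySem.List.pyGetD cs (p : Int) 0 - t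
           then PySem.List.pyGetD cs ((p : Int) - 1) 0
           else PySem.List.pyGetD cs (p : Int) 0) := by
  have hsle : cs.Pairwise (· ≤ ·) := hs.imp (fun h => le_of_lt h)
  obtain ⟨hp_le, hp_lt, hp_ge⟩ := PySem.List.bisectLeft_spec cs t hsle
  set p := PySem.List.bisectLeft cs t with hp
  have hlen : 0 < cs.length := List.length_pos_of_ne_nil hne
  have hmono : ∀ i j (hi : i < cs.length) (hj : j < cs.length), i < j → cs[i] < cs[j] :=
    fun i j hi hj hij => List.pairwise_iff_getElem.mp hs i j hi hj hij
  have hdec : ∀ (k : Nat) (hk : k < cs.length), cs = cs.take k ++ cs[k] :: cs.drop (k + 1) := by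
    intro k hk
    rw [List.getElem_cons_drop, List.take_append_drop]
  have key_take : ∀ (k : Nat) (hk : k < cs.length), (∀ j (hj : j < cs.length), j < k → |cs[k] - t| < |cs[j] - t|) →
      ∀ y ∈ cs.take k, |cs[k] - t| < |y - t| := by
    intro k hk hlt y hy
    obtain ⟨j, hj, rfl⟩ := List.mem_iff_getElem.mp hy
    have hjk : j < k := lt_of_lt_of_le hj (by simp [List.length_take])
    have hjlen : j < cs.length := by omega
    simp only [List.getElem_take]
    exact hlt j hjlen hjk
  have key_drop : ∀ (k : Nat) (hk : k < cs.length), (∀ j (hj : j < cs.length), k < j → |cs[k] - t| ≤ |cs[j] - t|) →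
      ∀ y ∈ cs.drop (k + 1), |cs[k] - t| ≤ |y - t| := by
    intro k hk hle y hy
    obtain ⟨j, hj, rfl⟩ := List.mem_iff_getElem.mp hy
    have hjlen : k + 1 + j < cs.length := by simp [List.length_drop] at hj; omega
    simp only [List.getElem_drop]
    exact hle (k + 1 + j) hjlen (by omega)
  by_cases h0 : p = 0
  · rw [if_pos h0]
    have hget : PySem.List.pyGetD cs 0 0 = cs[0] := by
      have := PySem.List.pyGetD_eq_getElem cs (i := 0) 0 (by omega) (by exact_mod_cast hlen)
      simpa using this
    rw [hget]
    conv_lhs => rw [hdec 0 hlen]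
    refine pv_min?_first _ _ _ _ (key_take 0 hlen ?_) (key_drop 0 hlen ?_)
    · intro j hj hj0; omega
    · intro j hj h0j
      have h1 : t ≤ cs[0] := hp_ge 0 hlen (by omega)
      have h2 : cs[0] ≤ cs[j] := le_of_lt (hmono 0 j hlen hj h0j)
      rw [abs_of_nonneg (by omega), abs_of_nonneg (by omega)]
      omega
  · by_cases hL : p = cs.length
    · rw [if_neg h0, if_pos hL]
      have hk : cs.length - 1 < cs.length := by omega
      have hgl : PySem.List.pyGetD cs (-1) 0 = cs[cs.length - 1] := by
        rw [PySem.List.pyGetD_neg_one cs 0 hne, List.getLast_eq_getElem hne]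
      rw [hgl]
      conv_lhs => rw [hdec (cs.length - 1) hk]
      refine pv_min?_first _ _ _ _ (key_take _ hk ?_) (key_drop _ hk ?_)
      · intro j hj hjk
        have h1 : cs[cs.length - 1] < t := hp_lt (cs.length - 1) hk (by omega)
        have h2 : cs[j] < t := hp_lt j hj (by omega)
        have h3 : cs[j] < cs[cs.length - 1] := hmono j (cs.length - 1) hj hk hjk
        rw [abs_of_nonpos (by omega), abs_of_nonpos (by omega)]
        omega
      · intro j hj hjk; omega
    · rw [if_neg h0, if_neg hL]
      have hplen : p < cs.length := lt_of_le_of_ne hp_le hL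
      have hp1len : p - 1 < cs.length := by omega
      have hgetl : PySem.List.pyGetD cs ((p : Int) - 1) 0 = cs[p - 1] := by
        have := PySem.List.pyGetD_eq_getElem cs (i := (p : Int) - 1) 0 (by omega) (by omega)
        rw [this]; congr 1; omega
      have hgetr : PySem.List.pyGetD cs (p : Int) 0 = cs[p] := by
        have := PySem.List.pyGetD_eq_getElem cs (i := (p : Int)) 0 (by omega) (by omega)
        simpa using this
      rw [hgetl, hgetr]
      have hl : cs[p - 1] < t := hp_lt (p - 1) hp1len (by omega)
      have hr : t ≤ cs[p] := hp_ge p hplen (by omega)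
      by_cases hcmp : t - cs[p - 1] ≤ cs[p] - t
      · rw [if_pos hcmp]
        conv_lhs => rw [hdec (p - 1) hp1len]
        refine pv_min?_first _ _ _ _ (key_take _ hp1len ?_) (key_drop _ hp1len ?_)
        · intro j hj hjk
          have h2 : cs[j] < cs[p - 1] := hmono j (p - 1) hj hp1len hjk
          rw [abs_of_nonpos (by omega), abs_of_nonpos (by omega)]
          omega
        · intro j hj hjk
          have h2 : t ≤ cs[j] := hp_ge j hj (by omega)
          have h3 : cs[p] ≤ cs[j] := by
            rcases eq_or_lt_of_le (by omega : p ≤ j) with he|hlt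
            · subst he; omega
            · exact le_of_lt (hmono p j hplen hj hlt)
          rw [abs_of_nonpos (by omega), abs_of_nonneg (by omega)]
          omega
      · rw [if_neg hcmp]
        conv_lhs => rw [hdec p hplen]
        refine pv_min?_first _ _ _ _ (key_take _ hplen ?_) (key_drop _ hplen ?_)
        · intro j hj hjk
          have h1 : cs[j] < t := hp_lt j hj hjk
          have h2 : cs[j] ≤ cs[p - 1] := by
            rcases eq_or_lt_of_le (by omega : j ≤ p - 1) with he|hlt
            · subst he; omega
            · exact le_of_lt (hmono j (p - 1) hj hp1len hlt)
          rw [abs_of_nonneg (by omega), abs_of_nonpos (by omega)]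
          omega
        · intro j hj hjk
          have h2 : cs[p] < cs[j] := hmono p j hplen hj hjk
          rw [abs_of_nonneg (by omega), abs_of_nonneg (by omega)]
          omega

-- ----- the common per-bucket pick and the two step lemmas -----

def pvPick (scores : List (Int × Int)) (T nr : Int) (cs : List Int) (b : Int) : Int :=
  let a := pvBound T nr b
  let z := pvBound T nr (b + 1)
  let bucket := cs.filter (fun c => decide (a ≤ c ∧ c < z))
  if bucket ≠ [] then
    (PySem.List.max? bucket (fun i => PySem.Dict.getD ⟨scores⟩ i 0)).getD 0
  else
    (PySem.List.min? cs (fun i => |i - pvCenter a z|)).getD 0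

theorem pv_stepA_mem (scores : List (Int × Int)) (T nr : Int) (cs : List Int)
    (hne : cs ≠ []) (chosen : List Int) (b : Int) (x : Int) :
    x ∈ pvStepA scores T nr cs chosen b ↔ x ∈ chosen ∨ x = pvPick scores T nr cs b := by
  simp only [pvStepA, pvPick]
  by_cases hbk : cs.filter (fun c => decide (pvBound T nr b ≤ c ∧ c < pvBound T nr (b + 1))) ≠ []
  · rw [if_pos hbk, if_pos hbk]
    cases hm : PySem.List.max? (cs.filter (fun c => decide (pvBound T nr b ≤ c ∧ c < pvBound T nr (b + 1)))) (fun i => PySem.Dict.getD ⟨scores⟩ i 0) with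
    | none => exact absurd ((PySem.List.max?_eq_none_iff _ _).mp hm) hbk
    | some m => simp [List.mem_append]
  · rw [if_neg hbk, if_neg hbk]
    cases hm : PySem.List.min? cs (fun i => |i - pvCenter (pvBound T nr b) (pvBound T nr (b + 1))|) with
    | none => exact absurd ((PySem.List.min?_eq_none_iff _ _).mp hm) hne
    | some m =>
      simp only [Option.getD_some]
      by_cases hmem : m ∈ chosen
      · rw [if_pos hmem]
        constructor
        · exact fun h => Or.inl h
        · rintro (h | rfl)
          · exact h
          · exact hmem
      · rw [if_neg hmem]
        simp [List.mem_append]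

theorem pv_stepB_mem (scores : List (Int × Int)) (T nr : Int) (cs : List Int)
    (hne : cs ≠ []) (hs : cs.Pairwise (· < ·))
    (bounds : List Int) (hb : bounds = (PySem.List.pyRange 0 (nr + 1) 1).map (fun b => pvBound T nr b))
    (chosen : PySem.Set Int) (b : Int) (h0 : 0 ≤ b) (h1 : b < nr) (x : Int) :
    x ∈ pvStepB scores bounds cs chosen b ↔ x ∈ chosen ∨ x = pvPick scores T nr cs b := by
  have hsle : cs.Pairwise (· ≤ ·) := hs.imp (fun h => le_of_lt h)
  have hlen : 0 < cs.length := List.length_pos_of_ne_nil hne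
  subst hb
  have ha : PySem.List.pyGetD ((PySem.List.pyRange 0 (nr + 1) 1).map (fun b => pvBound T nr b)) b 0 = pvBound T nr b :=
    PySem.List.pyGetD_map_pyRange_of_nonneg _ (nr + 1) b 0 h0 (by omega)
  have hz : PySem.List.pyGetD ((PySem.List.pyRange 0 (nr + 1) 1).map (fun b => pvBound T nr b)) (b + 1) 0 = pvBound T nr (b + 1) :=
    PySem.List.pyGetD_map_pyRange_of_nonneg _ (nr + 1) (b + 1) 0 (by omega) (by omega)
  simp only [pvStepB, pvPick, ha, hz]
  set a := pvBound T nr b with hadef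
  set z := pvBound T nr (b + 1) with hzdef
  set lo := PySem.List.bisectLeft cs a with hlo
  set hi := PySem.List.bisectLeft cs z with hhi
  have hslice : PySem.List.slice cs (some (lo : Int)) (some (hi : Int)) =
      cs.filter (fun c => decide (a ≤ c ∧ c < z)) := by
    rw [PySem.List.slice_natCast, pv_bucket_eq cs hsle a z]
  by_cases hlt : lo < hi
  · rw [if_pos hlt, if_pos ((pv_bucket_ne_nil cs hsle a z).mpr hlt)]
    rw [hslice]
    cases hm : PySem.List.max? (cs.filter (fun c => decide (a ≤ c ∧ c < z))) (fun i => PySem.Dict.getD ⟨scores⟩ i 0) with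
    | none =>
      exact absurd ((PySem.List.max?_eq_none_iff _ _).mp hm) ((pv_bucket_ne_nil cs hsle a z).mpr hlt)
    | some m => simp [PySem.Set.mem_add]
  · rw [if_neg hlt, if_neg (fun hnn => hlt ((pv_bucket_ne_nil cs hsle a z).mp hnn))]
    rw [pv_fallback cs (pvCenter a z) hne hs]
    simp only [Option.getD_some]
    split
    · simp [PySem.Set.mem_add]
    · split
      · simp [PySem.Set.mem_add]
      · simp [PySem.Set.mem_add]

theorem pv_fold_mem (scores : List (Int × Int)) (T nr : Int) (cs : List Int)
    (hne : cs ≠ []) (hs : cs.Pairwise (· < ·))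
    (bounds : List Int) (hb : bounds = (PySem.List.pyRange 0 (nr + 1) 1).map (fun b => pvBound T nr b)) :
    ∀ (bs : List Int), (∀ b ∈ bs, 0 ≤ b ∧ b < nr) →
      ∀ (cA : List Int) (cB : PySem.Set Int), (∀ x, x ∈ cA ↔ x ∈ cB) →
        ∀ x, x ∈ bs.foldl (pvStepA scores T nr cs) cA ↔ x ∈ bs.foldl (pvStepB scores bounds cs) cB := by
  intro bs
  induction bs with
  | nil => intro _ cA cB h x; simpa using h x
  | cons b bs ih =>
    intro hmem cA cB h x
    simp only [List.foldl_cons]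
    refine ih (fun b' hb' => hmem b' (by simp [hb'])) _ _ ?_ x
    intro y
    rw [pv_stepA_mem scores T nr cs hne _ b,
        pv_stepB_mem scores T nr cs hne hs bounds hb cB b (hmem b (by simp)).1 (hmem b (by simp)).2]
    rw [h y]

theorem pv_set_nodup_add (s : PySem.Set Int) (x : Int) (h : s.Nodup) : (s.add x).Nodup := by
  unfold PySem.Set.add
  split
  · exact h
  · next hc =>
    simp only [Bool.not_eq_true] at hc
    have hx : x ∉ s := by simpa using hc
    simp only [List.nodup_append, List.nodup_cons, List.nodup_nil]
    refine ⟨h, ⟨by simp, trivial⟩, ?_⟩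
    intro a ha b hb
    simp only [List.mem_singleton] at hb
    subst hb
    exact fun he => hx (he ▸ ha)

theorem pv_stepB_nodup (scores : List (Int × Int)) (bounds : List Int) (cs : List Int)
    (chosen : PySem.Set Int) (h : chosen.Nodup) (b : Int) :
    (pvStepB scores bounds cs chosen b).Nodup := by
  simp only [pvStepB]
  split
  · split
    · exact pv_set_nodup_add _ _ h
    · exact h
  · split
    · exact pv_set_nodup_add _ _ h
    · split
      · exact pv_set_nodup_add _ _ h
      · exact pv_set_nodup_add _ _ h

theorem pv_fold_nodup (scores : List (Int × Int)) (bounds : List Int) (cs : List Int) :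
    ∀ (bs : List Int) (cB : PySem.Set Int), cB.Nodup → (bs.foldl (pvStepB scores bounds cs) cB).Nodup := by
  intro bs
  induction bs with
  | nil => intro cB h; exact h
  | cons b bs ih =>
    intro cB h
    simp only [List.foldl_cons]
    exact ih _ (pv_stepB_nodup scores bounds cs cB h b)

-- ===== VERDICT (by name: the statement is the Claim_ definition above) =====
theorem choose_bucketed_best_py_spec : Claim_equal_choose_bucketed_best_py := by
  unfold Claim_equal_choose_bucketed_best_py
  intro candidates scores total_N num_refs _ _
  unfold Spec_choose_bucketed_best_py
  unfold choose_bucketed_best_py choose_bucketed_best_py_alt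
  by_cases hc : candidates = []
  · rw [if_pos hc, if_pos hc]
  · rw [if_neg hc, if_neg hc]
    set cs := PySem.List.sorted (PySem.Set.ofList candidates) (fun x => x) with hcs
    set nr : Int := max 1 num_refs with hnr
    have hsl : cs.Pairwise (· < ·) := PySem.List.sorted_ofList_pairwise_lt candidates
    have hne : cs ≠ [] := by
      intro h
      rw [hcs, PySem.List.sorted_eq_nil_iff] at h
      obtain ⟨y, hy⟩ := List.exists_mem_of_ne_nil candidates hc
      have : y ∈ PySem.Set.ofList candidates := (PySem.Set.mem_ofList candidates y).mpr hy
      rw [h] at this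
      simp at this
    set bounds : List Int := (PySem.List.pyRange 0 (nr + 1) 1).map (fun b => pvBound total_N nr b) with hbdef
    have hmem := pv_fold_mem scores total_N nr cs hne hsl bounds hbdef
      (PySem.List.pyRange 0 nr 1)
      (fun b hb => by
        have := PySem.List.mem_pyRange_one.mp hb
        exact ⟨this.1, this.2⟩)
      [] PySem.Set.empty
      (by intro x; simp [PySem.Set.empty])
    have hnodup : ((PySem.List.pyRange 0 nr 1).foldl (pvStepB scores bounds cs) PySem.Set.empty).Nodup :=
      pv_fold_nodup scores bounds cs (PySem.List.pyRange 0 nr 1) PySem.Set.empty (by simp [PySem.Set.empty])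
    rw [PySem.List.sorted_id_eq_sorted_id_iff_perm]
    rw [List.perm_ext_iff_of_nodup (PySem.Set.nodup_ofList _) hnodup]
    intro y
    rw [PySem.Set.mem_ofList]
    exact hmem y
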